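-- pv_equiv track=rewrite | github.com/jchristinck/AdventOfCode2021 | day4/both_parts.py | mark_finished_boards
-- ===== SOURCE A (Python) =====
-- def mark_finished_boards(boards, winner_boards, board_size=5):
--     """ checks for finished boards and marks the element at its index in winner_boards list with place of the board"""
--     for idx in range(len(boards)):  # go board-wise
--         col_chosen = [0 for _ in range(board_size)]
--         for idy in range(board_size):  # go row-wise
--             row_chosen = 0
--             for idz in range(len(boards[0][0])):  # go column-wise
--                 if boards[idx][idy][idz] == 1:  # if cell is marked
--                     col_chosen[idz] += 1
--                     row_chosen += 1
--             if (row_chosen == board_size) and not winner_boards[idx]:  # row marked and board not yet won?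
--                 winner_boards[idx] = max(winner_boards) + 1  # mark board with place
--         for idz in range(board_size):  # go column-wise
--             if (col_chosen[idz] == board_size) and not winner_boards[idx]:  # column marked and board not yet won?
--                 winner_boards[idx] = max(winner_boards) + 1  # mark board with place
--     return winner_boards
-- ===== SOURCE B (Python) =====
-- def mark_finished_boards(boards, winner_boards, board_size=5):
--     """ checks for finished boards and marks the element at its index in winner_boards list with place of the board"""
--     for idx, board in enumerate(boards):
--         row_win = any(all(cell == 1 for cell in board[r]) for r in range(board_size))
--         col_win = any(all(board[r][c] == 1 for r in range(board_size)) for c in range(board_size))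
--         if (row_win or col_win) and not winner_boards[idx]:
--             winner_boards[idx] = max(winner_boards) + 1
--     return winner_boards
-- ===== Notes on version B (the rewrite author's own statement) =====
-- stated objective: simpler
-- what changed: B decides each board with any/all line checks instead of A's col_chosen/row_chosen count accumulators, repeated mid-loop mark check and second column pass, marking at most once per board; Pre_ restricts to the natural domain of square boards (each board has at least board_size rows of length exactly board_size), because on ragged boards A's scan width len(boards[0][0]) applied to every board is an accident of A's implementation, and excludes inputs where a completed board's index lies beyond winner_boards, on which A raises IndexError.
-- outside the precondition, e.g. on mark_finished_boards([[[1], [0]]], [0], 2): A returns [0], B raises IndexError; on mark_finished_boards([[[0], [0]]], [0], 2): A returns [0], B raises IndexError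
import Mathlib
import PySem

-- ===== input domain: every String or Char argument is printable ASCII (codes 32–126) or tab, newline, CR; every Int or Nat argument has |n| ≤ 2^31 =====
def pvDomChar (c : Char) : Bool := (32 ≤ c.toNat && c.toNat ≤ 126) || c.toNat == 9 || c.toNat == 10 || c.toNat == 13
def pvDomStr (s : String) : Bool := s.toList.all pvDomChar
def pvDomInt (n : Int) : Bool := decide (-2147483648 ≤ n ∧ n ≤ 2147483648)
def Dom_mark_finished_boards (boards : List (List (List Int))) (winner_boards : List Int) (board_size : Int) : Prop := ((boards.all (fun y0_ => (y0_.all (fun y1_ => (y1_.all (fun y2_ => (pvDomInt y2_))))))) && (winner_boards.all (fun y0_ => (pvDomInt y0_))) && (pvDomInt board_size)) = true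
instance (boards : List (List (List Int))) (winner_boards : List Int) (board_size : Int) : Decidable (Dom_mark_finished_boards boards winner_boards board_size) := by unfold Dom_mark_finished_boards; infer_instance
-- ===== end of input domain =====

-- B replaces A's per-cell count accumulators (col_chosen array and row_chosen counter, with the
-- mark check repeated inside the row loop and a second column pass) by per-board any/all line
-- checks that mark at most once; objective: simpler. Both versions mutate winner_boards in
-- place in Python and return it; the equivalence proved here is about the returned value.

-- ===== PORT A =====
def mark_finished_boards (boards : List (List (List Int))) (winner_boards : List Int) (board_size : Int) : List Int :=
  (PySem.List.pyRange 0 (boards.length : Int) 1).foldl (fun wb idx =>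
    let colInit : List Int := (PySem.List.pyRange 0 board_size 1).map (fun _ => (0 : Int))
    let st := (PySem.List.pyRange 0 board_size 1).foldl (fun (st : List Int × List Int) idy =>
      let inner := (PySem.List.pyRange 0 ((PySem.List.pyGetD (PySem.List.pyGetD boards 0 []) 0 []).length : Int) 1).foldl
        (fun (st2 : List Int × Int) idz =>
          if PySem.List.pyGetD (PySem.List.pyGetD (PySem.List.pyGetD boards idx []) idy []) idz 0 == 1 then
            (PySem.List.pySetD st2.1 idz (PySem.List.pyGetD st2.1 idz 0 + 1), st2.2 + 1)
          else st2) (st.1, (0 : Int))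
      if inner.2 == board_size && PySem.List.pyGetD st.2 idx 0 == 0 then
        (inner.1, PySem.List.pySetD st.2 idx ((PySem.List.max? st.2 (fun x => x)).getD 0 + 1))
      else (inner.1, st.2)) (colInit, wb)
    (PySem.List.pyRange 0 board_size 1).foldl (fun wb2 idz =>
      if PySem.List.pyGetD st.1 idz 0 == board_size && PySem.List.pyGetD wb2 idx 0 == 0 then
        PySem.List.pySetD wb2 idx ((PySem.List.max? wb2 (fun x => x)).getD 0 + 1)
      else wb2) st.2) winner_boards

-- ===== PORT B =====
def mark_finished_boards_alt (boards : List (List (List Int))) (winner_boards : List Int) (board_size : Int) : List Int :=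
  (PySem.List.enumerate boards).foldl (fun wb p =>
    let row_win := (PySem.List.pyRange 0 board_size 1).any (fun r =>
      (PySem.List.pyGetD p.2 r []).all (fun cell => cell == 1))
    let col_win := (PySem.List.pyRange 0 board_size 1).any (fun c =>
      (PySem.List.pyRange 0 board_size 1).all (fun r =>
        PySem.List.pyGetD (PySem.List.pyGetD p.2 r []) c 0 == 1))
    if (row_win || col_win) && PySem.List.pyGetD wb p.1 0 == 0 then
      PySem.List.pySetD wb p.1 ((PySem.List.max? wb (fun x => x)).getD 0 + 1)
    else wb) winner_boards

-- ===== PRECONDITION & SPEC =====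
-- 'board n×n-wins': some of the first n rows is all 1s, or some of the first n columns is 1
-- in each of the first n rows
def pvWins (board : List (List Int)) (n : Nat) : Bool :=
  (List.range n).any (fun r => (board.getD r []).all (fun c => c == 1))
  || (List.range n).any (fun c => (List.range n).all (fun r => (board.getD r []).getD c 0 == 1))

-- Pre_ restricts to the natural bingo domain of square boards — each board has at least
-- board_size rows of length exactly board_size (so len(boards[0][0]) = board_size; on ragged
-- boards A's scan width len(boards[0][0]) applied to every board is an accident of A and B may
-- raise or differ) — and excludes inputs where a completed board's index lies beyond
-- winner_boards, on which both Pythons raise IndexError.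
def Pre_mark_finished_boards (boards : List (List (List Int))) (winner_boards : List Int) (board_size : Int) : Prop :=
  0 < board_size → boards ≠ [] →
    ((∀ b ∈ boards, board_size.toNat ≤ b.length ∧
        ∀ r ∈ b.take board_size.toNat, r.length = board_size.toNat) ∧
     ∀ i ∈ List.range boards.length, winner_boards.length ≤ i →
       pvWins (boards.getD i []) board_size.toNat = false)
instance (boards : List (List (List Int))) (winner_boards : List Int) (board_size : Int) : Decidable (Pre_mark_finished_boards boards winner_boards board_size) := by unfold Pre_mark_finished_boards; infer_instance

def pvWitness_mark_finished_boards : List (List (List Int)) × List Int × Int :=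
  ([[[1, 1], [0, 1]], [[1, 0], [1, 0]]], [0, 0], 2)

def Spec_mark_finished_boards (boards : List (List (List Int))) (winner_boards : List Int) (board_size : Int) (out : List Int) : Prop := out = mark_finished_boards_alt boards winner_boards board_size
instance (boards : List (List (List Int))) (winner_boards : List Int) (board_size : Int) (out : List Int) : Decidable (Spec_mark_finished_boards boards winner_boards board_size out) := by unfold Spec_mark_finished_boards; infer_instance

-- ===== CLAIM (what is proved, stated in full; the proofs are below) =====
def Claim_equal_mark_finished_boards : Prop := ∀ (boards : List (List (List Int))) (winner_boards : List Int) (board_size : Int), Dom_mark_finished_boards boards winner_boards board_size → Pre_mark_finished_boards boards winner_boards board_size → Spec_mark_finished_boards boards winner_boards board_size (mark_finished_boards boards winner_boards board_size)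

-- ===== LEMMAS AND PROOFS =====

-- 'mark board idx as won, if t triggers and it is not yet won' — the common marking action of both ports
def pvMark (idx : Int) (t : Bool) (wb : List Int) : List Int :=
  if t && (PySem.List.pyGetD wb idx 0 == 0) then
    PySem.List.pySetD wb idx ((PySem.List.max? wb (fun x => x)).getD 0 + 1)
  else wb

theorem pvMark_false (idx : Int) (wb : List Int) : pvMark idx false wb = wb := by
  simp [pvMark]

theorem pvMark_of_ne (idx : Int) (t : Bool) (wb : List Int)
    (h : ¬ PySem.List.pyGetD wb idx 0 = 0) : pvMark idx t wb = wb := by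
  simp [pvMark, h]

theorem pvMark_noop (idx : Int) (h0 : 0 ≤ idx) (t : Bool) (wb : List Int)
    (hl : wb.length ≤ idx.toNat) : pvMark idx t wb = wb := by
  unfold pvMark
  rw [PySem.List.pySetD_of_nonneg _ _ h0, List.set_eq_of_length_le hl]
  split <;> rfl

theorem pvMark_mark (idx : Int) (h0 : 0 ≤ idx) (t : Bool) (wb : List Int) :
    pvMark idx t (pvMark idx true wb) = pvMark idx true wb := by
  by_cases h : PySem.List.pyGetD wb idx 0 = 0
  · by_cases hl : idx.toNat < wb.length
    · have hmark : pvMark idx true wb =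
          PySem.List.pySetD wb idx ((PySem.List.max? wb (fun x => x)).getD 0 + 1) := by
        simp [pvMark, h]
      rw [hmark]
      -- the max is ≥ the entry at idx, which is 0, so the new value is ≥ 1
      have hne : wb ≠ [] := by
        intro hnil; rw [hnil] at hl; simp at hl
      obtain ⟨m, hm⟩ : ∃ m, PySem.List.max? wb (fun x => x) = some m := by
        cases hmx : PySem.List.max? wb (fun x => x) with
        | none => exact absurd ((PySem.List.max?_eq_none_iff wb _).1 hmx) hne
        | some m => exact ⟨m, rfl⟩
      have hmem : wb[idx.toNat] ∈ wb := List.getElem_mem hl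
      have h0m : (0 : Int) ≤ m := by
        have := PySem.List.max?_isMax hm _ hmem
        rw [PySem.List.pyGetD_eq_getElem wb 0 h0 (by omega)] at h
        simpa [h] using this
      apply pvMark_of_ne
      rw [PySem.List.pySetD_of_nonneg _ _ h0,
        PySem.List.pyGetD_eq_getElem _ 0 h0 (by simp; omega)]
      simp [List.getElem_set_self, hm]
      omega
    · have hl' : wb.length ≤ idx.toNat := by omega
      rw [pvMark_noop idx h0 true wb hl', pvMark_noop idx h0 t wb hl']
  · rw [pvMark_of_ne _ _ _ h, pvMark_of_ne _ _ _ h]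

theorem pvMark_fold {α : Type} (idx : Int) (h0 : 0 ≤ idx) (L : List α) (trig : α → Bool)
    (wb : List Int) :
    L.foldl (fun wb x => pvMark idx (trig x) wb) wb = pvMark idx (L.any trig) wb := by
  induction L generalizing wb with
  | nil => simp [pvMark]
  | cons x L ih =>
    simp only [List.foldl_cons, List.any_cons]
    cases htx : trig x
    · simp only [pvMark, Bool.false_and, Bool.false_or]
      exact ih wb
    · rw [ih (pvMark idx true wb), pvMark_mark idx h0, Bool.true_or]

theorem pvMark_comb (idx : Int) (h0 : 0 ≤ idx) (r c : Bool) (wb : List Int) :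
    pvMark idx c (pvMark idx r wb) = pvMark idx (r || c) wb := by
  cases r
  · simp [pvMark_false]
  · rw [pvMark_mark idx h0, Bool.true_or]

theorem pvCountAll {α : Type} (L : List α) (n : Nat) (hL : L.length = n) (p : α → Bool) :
    ((L.countP p : Int) == (n : Int)) = L.all p := by
  by_cases hall : L.all p = true
  · have hc : L.countP p = n := by rw [← hL]; exact List.countP_eq_length.2 (List.all_eq_true.1 hall)
    simp [hall, hc]
  · have hc : L.countP p ≠ n := by
      intro hcc
      exact hall (List.all_eq_true.2 (List.countP_eq_length.1 (by rw [hcc, hL])))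
    rw [Bool.eq_false_iff.2 hall]
    simp [hc]

theorem pvAllCongrMem {α : Type} (l : List α) (f g : α → Bool) (h : ∀ x ∈ l, f x = g x) :
    l.all f = l.all g := by
  induction l with
  | nil => rfl
  | cons x t ih =>
    simp only [List.all_cons, h x (by simp)]
    rw [ih (fun y hy => h y (by simp [hy]))]

theorem pvInnerSnd (row : List Int) (m : Nat) (hm : m ≤ row.length) :
    ∀ (col : List Int) (rc : Int),
    ((PySem.List.pyRange 0 (m : Int) 1).foldl
      (fun (st2 : List Int × Int) idz =>
        if PySem.List.pyGetD row idz 0 == 1 then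
          (PySem.List.pySetD st2.1 idz (PySem.List.pyGetD st2.1 idz 0 + 1), st2.2 + 1)
        else st2) (col, rc)).2
    = rc + ((row.take m).countP (fun c => c == 1) : Int) := by
  induction m with
  | zero => intro col rc; simp [PySem.List.pyRange_one_eq_nil]
  | succ m ih =>
    intro col rc
    have hm' : m ≤ row.length := by omega
    have hcast : ((m + 1 : Nat) : Int) = (m : Int) + 1 := by push_cast; ring
    rw [hcast, PySem.List.pyRange_one_succ_right (by positivity), List.foldl_append,
      List.foldl_cons, List.foldl_nil]
    obtain ⟨x, hx⟩ : ∃ x, row[m]? = some x := ⟨row[m], List.getElem?_eq_getElem (by omega)⟩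
    have hgd : PySem.List.pyGetD row (m : Int) 0 = x := by
      rw [PySem.List.pyGetD_natCast, List.getD_eq_getElem?_getD, hx]; rfl
    have hrow : row.take (m+1) = row.take m ++ [x] := by
      rw [List.take_add_one, hx]; rfl
    rw [hrow, List.countP_append, hgd]
    by_cases hc : x = 1
    · rw [if_pos (by simp [hc])]
      rw [show ∀ (p : List Int × Int), (p.1, p.2 + 1).2 = p.2 + 1 from fun _ => rfl]
      rw [ih hm' col rc]
      simp [hc]
      ring
    · rw [if_neg (by simp [hc])]
      rw [ih hm' col rc]
      simp [hc]

theorem pvInnerFst (row : List Int) (m : Nat) (col : List Int) (rc : Int)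
    (hm : m ≤ row.length)
    (hd : ∀ j : Nat, col.length ≤ j → j < m → row.getD j 0 ≠ 1) :
    ((PySem.List.pyRange 0 (m : Int) 1).foldl
      (fun (st2 : List Int × Int) idz =>
        if PySem.List.pyGetD row idz 0 == 1 then
          (PySem.List.pySetD st2.1 idz (PySem.List.pyGetD st2.1 idz 0 + 1), st2.2 + 1)
        else st2) (col, rc)).1.length = col.length
    ∧ ∀ j : Nat,
    ((PySem.List.pyRange 0 (m : Int) 1).foldl
      (fun (st2 : List Int × Int) idz =>
        if PySem.List.pyGetD row idz 0 == 1 then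
          (PySem.List.pySetD st2.1 idz (PySem.List.pyGetD st2.1 idz 0 + 1), st2.2 + 1)
        else st2) (col, rc)).1.getD j 0
      = col.getD j 0 + (if j < m ∧ row.getD j 0 = 1 then 1 else 0) := by
  induction m with
  | zero => simp [PySem.List.pyRange_one_eq_nil]
  | succ m ih =>
    have hm' : m ≤ row.length := by omega
    obtain ⟨ihl, ihg⟩ := ih hm' (fun j h1 h2 => hd j h1 (by omega))
    have hcast : ((m + 1 : Nat) : Int) = (m : Int) + 1 := by push_cast; ring
    rw [hcast, PySem.List.pyRange_one_succ_right (by positivity), List.foldl_append,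
      List.foldl_cons, List.foldl_nil]
    obtain ⟨x, hx⟩ : ∃ x, row[m]? = some x := ⟨row[m], List.getElem?_eq_getElem (by omega)⟩
    have hgdrow : row.getD m 0 = x := by rw [List.getD_eq_getElem?_getD, hx]; rfl
    have hgd : PySem.List.pyGetD row (m : Int) 0 = x := by
      rw [PySem.List.pyGetD_natCast, hgdrow]
    rw [hgd]
    by_cases hc : x = 1
    · rw [if_pos (by simp [hc])]
      set F := ((PySem.List.pyRange 0 (m : Int) 1).foldl
        (fun (st2 : List Int × Int) idz =>
          if PySem.List.pyGetD row idz 0 == 1 then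
            (PySem.List.pySetD st2.1 idz (PySem.List.pyGetD st2.1 idz 0 + 1), st2.2 + 1)
          else st2) (col, rc)) with hF
      have hmlt : m < F.1.length := by
        rw [ihl]
        by_contra hcon
        exact hd m (by omega) (by omega) (by rw [hgdrow]; exact hc)
      constructor
      · simpa [PySem.List.pySetD_of_nonneg _ _ (by positivity : (0:Int) ≤ (m:Int))] using ihl
      · intro j
        rw [show (PySem.List.pySetD F.1 (m:Int) (PySem.List.pyGetD F.1 (m:Int) 0 + 1), F.2 + 1).1
            = PySem.List.pySetD F.1 (m:Int) (PySem.List.pyGetD F.1 (m:Int) 0 + 1) from rfl]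
        rw [PySem.List.pySetD_of_nonneg _ _ (by positivity : (0:Int) ≤ (m:Int))]
        have hset : ∀ d : Int, (F.1.set ((m:Int)).toNat (PySem.List.pyGetD F.1 (m:Int) 0 + 1)).getD j d
            = if j = m then PySem.List.pyGetD F.1 (m:Int) 0 + 1 else F.1.getD j d := by
          intro d
          simp only [Int.toNat_natCast]
          rw [List.getD_eq_getElem?_getD, List.getElem?_set]
          by_cases hj : j = m
          · simp [hj, hmlt]
          · simp [Ne.symm hj, hj, List.getD_eq_getElem?_getD]
        rw [hset 0]
        by_cases hj : j = m
        · subst hj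
          rw [if_pos rfl, PySem.List.pyGetD_natCast, ihg j]
          rw [if_neg (by omega), if_pos (by constructor; omega; rw [hgdrow]; exact hc)]
          ring
        · rw [if_neg hj, ihg j]
          have : (j < m + 1 ∧ row.getD j 0 = 1) ↔ (j < m ∧ row.getD j 0 = 1) := by
            constructor
            · rintro ⟨h1, h2⟩; exact ⟨by omega, h2⟩
            · rintro ⟨h1, h2⟩; exact ⟨by omega, h2⟩
          simp only [this]
    · rw [if_neg (by simp [hc])]
      refine ⟨ihl, fun j => ?_⟩
      rw [ihg j]
      have : (j < m + 1 ∧ row.getD j 0 = 1) ↔ (j < m ∧ row.getD j 0 = 1) := by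
        constructor
        · rintro ⟨h1, h2⟩
          refine ⟨?_, h2⟩
          rcases Nat.lt_succ_iff_lt_or_eq.1 h1 with h | h
          · exact h
          · subst h; rw [hgdrow] at h2; exact absurd h2 hc
        · rintro ⟨h1, h2⟩; exact ⟨by omega, h2⟩
      simp only [this]

theorem pvColFold (n w : Nat) (rows : List (List Int))
    (hrows : ∀ r ∈ rows, w ≤ r.length ∧ ∀ j : Nat, n ≤ j → j < w → r.getD j 0 ≠ 1) :
    ∀ col : List Int, col.length = n →
    (rows.foldl (fun c row =>
        ((PySem.List.pyRange 0 (w : Int) 1).foldl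
          (fun (st2 : List Int × Int) idz =>
            if PySem.List.pyGetD row idz 0 == 1 then
              (PySem.List.pySetD st2.1 idz (PySem.List.pyGetD st2.1 idz 0 + 1), st2.2 + 1)
            else st2) (c, 0)).1) col).length = n
    ∧ ∀ j : Nat, (rows.foldl (fun c row =>
        ((PySem.List.pyRange 0 (w : Int) 1).foldl
          (fun (st2 : List Int × Int) idz =>
            if PySem.List.pyGetD row idz 0 == 1 then
              (PySem.List.pySetD st2.1 idz (PySem.List.pyGetD st2.1 idz 0 + 1), st2.2 + 1)
            else st2) (c, 0)).1) col).getD j 0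
      = col.getD j 0 + (rows.countP (fun r => decide (j < w) && (r.getD j 0 == 1)) : Int) := by
  induction rows with
  | nil => intro col hcol; simp [hcol]
  | cons r rows ih =>
    intro col hcol
    obtain ⟨hrl, hrd⟩ := hrows r List.mem_cons_self
    have hinner := pvInnerFst r w col 0 hrl (fun j h1 h2 => hrd j (by omega) h2)
    simp only [List.foldl_cons]
    obtain ⟨ihl, ihg⟩ := ih (fun x hx => hrows x (List.mem_cons_of_mem _ hx)) _
      (by rw [hinner.1]; exact hcol)
    refine ⟨ihl, fun j => ?_⟩
    rw [ihg j, hinner.2 j, List.countP_cons]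
    simp only [List.getD_eq_getElem?_getD]
    by_cases hj : j < w
    · by_cases hv : r[j]?.getD 0 = 1
      · simp [hj, hv]; ring
      · simp [hj, hv]
    · simp [hj]

theorem pvStepA (board : List (List Int)) (n : Nat) (idx : Int) (h0 : 0 ≤ idx)
    (hblen : n ≤ board.length)
    (hlen : ∀ r ∈ board.take n, r.length = n)
    (wb : List Int) :
    ((PySem.List.pyRange 0 (n : Int) 1).foldl (fun wb2 idz =>
      if PySem.List.pyGetD
          ((PySem.List.pyRange 0 (n : Int) 1).foldl (fun (st : List Int × List Int) idy =>
            let inner := (PySem.List.pyRange 0 (n : Int) 1).foldl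
              (fun (st2 : List Int × Int) idz =>
                if PySem.List.pyGetD (PySem.List.pyGetD board idy []) idz 0 == 1 then
                  (PySem.List.pySetD st2.1 idz (PySem.List.pyGetD st2.1 idz 0 + 1), st2.2 + 1)
                else st2) (st.1, (0 : Int))
            if inner.2 == (n : Int) && PySem.List.pyGetD st.2 idx 0 == 0 then
              (inner.1, PySem.List.pySetD st.2 idx ((PySem.List.max? st.2 (fun x => x)).getD 0 + 1))
            else (inner.1, st.2))
            ((PySem.List.pyRange 0 (n : Int) 1).map (fun _ => (0 : Int)), wb)).1 idz 0 == (n : Int)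
        && PySem.List.pyGetD wb2 idx 0 == 0 then
        PySem.List.pySetD wb2 idx ((PySem.List.max? wb2 (fun x => x)).getD 0 + 1)
      else wb2)
      ((PySem.List.pyRange 0 (n : Int) 1).foldl (fun (st : List Int × List Int) idy =>
        let inner := (PySem.List.pyRange 0 (n : Int) 1).foldl
          (fun (st2 : List Int × Int) idz =>
            if PySem.List.pyGetD (PySem.List.pyGetD board idy []) idz 0 == 1 then
              (PySem.List.pySetD st2.1 idz (PySem.List.pyGetD st2.1 idz 0 + 1), st2.2 + 1)
            else st2) (st.1, (0 : Int))
        if inner.2 == (n : Int) && PySem.List.pyGetD st.2 idx 0 == 0 then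
          (inner.1, PySem.List.pySetD st.2 idx ((PySem.List.max? st.2 (fun x => x)).getD 0 + 1))
        else (inner.1, st.2))
        ((PySem.List.pyRange 0 (n : Int) 1).map (fun _ => (0 : Int)), wb)).2)
    = pvMark idx
        ((PySem.List.pyRange 0 (n : Int) 1).any (fun r =>
            (PySem.List.pyGetD board r []).all (fun cell => cell == 1)) ||
         (PySem.List.pyRange 0 (n : Int) 1).any (fun c =>
            (PySem.List.pyRange 0 (n : Int) 1).all (fun r =>
              PySem.List.pyGetD (PySem.List.pyGetD board r []) c 0 == 1))) wb := by
  have htakelen : (board.take n).length = n := by rw [List.length_take]; omega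
  have htake : ∀ idy : Int, 0 ≤ idy → idy < (n : Int) →
      PySem.List.pyGetD board idy ([] : List Int) = PySem.List.pyGetD (board.take n) idy [] := by
    intro idy h1 h2
    rw [PySem.List.pyGetD_eq_getElem _ _ h1 (by omega),
      PySem.List.pyGetD_eq_getElem _ _ h1 (by rw [htakelen]; omega)]
    exact (List.getElem_take).symm
  have hmemtake : ∀ idy : Int, 0 ≤ idy → idy < (n : Int) →
      PySem.List.pyGetD board idy ([] : List Int) ∈ board.take n := by
    intro idy h1 h2
    rw [htake idy h1 h2, PySem.List.pyGetD_eq_getElem _ _ h1 (by rw [htakelen]; omega)]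
    exact List.getElem_mem (by rw [htakelen]; omega)
  have hrows : ∀ r ∈ board.take n, n ≤ r.length ∧ ∀ j : Nat, n ≤ j → j < n → r.getD j 0 ≠ 1 := by
    intro r hr
    exact ⟨(hlen r hr).ge, fun j h1 h2 => absurd (h1.trans_lt h2) (lt_irrefl n)⟩
  -- split the row loop into an independent column fold and a pvMark fold
  have hcongr : ∀ (st : List Int × List Int), ∀ idy ∈ PySem.List.pyRange 0 (n : Int) 1,
      (let inner := (PySem.List.pyRange 0 (n : Int) 1).foldl
          (fun (st2 : List Int × Int) idz =>
            if PySem.List.pyGetD (PySem.List.pyGetD board idy []) idz 0 == 1 then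
              (PySem.List.pySetD st2.1 idz (PySem.List.pyGetD st2.1 idz 0 + 1), st2.2 + 1)
            else st2) (st.1, (0 : Int))
        if inner.2 == (n : Int) && PySem.List.pyGetD st.2 idx 0 == 0 then
          (inner.1, PySem.List.pySetD st.2 idx ((PySem.List.max? st.2 (fun x => x)).getD 0 + 1))
        else (inner.1, st.2))
      = ((fun c idy => ((PySem.List.pyRange 0 (n : Int) 1).foldl
            (fun (st2 : List Int × Int) idz =>
              if PySem.List.pyGetD (PySem.List.pyGetD board idy []) idz 0 == 1 then
                (PySem.List.pySetD st2.1 idz (PySem.List.pyGetD st2.1 idz 0 + 1), st2.2 + 1)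
              else st2) (c, (0 : Int))).1) st.1 idy,
         pvMark idx (((((PySem.List.pyGetD board idy []).take n).countP (fun c => c == 1) : Int) == (n : Int))) st.2) := by
    intro st idy hmem
    obtain ⟨hy0, hyn⟩ := PySem.List.mem_pyRange_one.1 hmem
    have hlen' : n ≤ (PySem.List.pyGetD board idy []).length :=
      (hrows _ (hmemtake idy hy0 hyn)).1
    have hsnd := pvInnerSnd (PySem.List.pyGetD board idy []) n hlen' st.1 0
    simp only [hsnd, zero_add, pvMark]
    by_cases hcond : (((((PySem.List.pyGetD board idy []).take n).countP (fun c => c == 1) : Int) == (n : Int))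
        && PySem.List.pyGetD st.2 idx 0 == 0) = true
    · simp only [if_pos hcond]
    · simp only [if_neg hcond]
  rw [PySem.List.foldl_congr_mem _ _ _ _ hcongr]
  rw [PySem.List.foldl_prod_mk
    (f := fun c idy => ((PySem.List.pyRange 0 (n : Int) 1).foldl
      (fun (st2 : List Int × Int) idz =>
        if PySem.List.pyGetD (PySem.List.pyGetD board idy []) idz 0 == 1 then
          (PySem.List.pySetD st2.1 idz (PySem.List.pyGetD st2.1 idz 0 + 1), st2.2 + 1)
        else st2) (c, (0 : Int))).1)
    (g := fun w2 idy => pvMark idx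
      (((((PySem.List.pyGetD board idy []).take n).countP (fun c => c == 1) : Int) == (n : Int))) w2)]
  dsimp only
  rw [pvMark_fold idx h0]
  -- replace the indexed access by access into board.take n, then fold over the rows themselves
  have hcongr2 : ∀ (c : List Int), ∀ idy ∈ PySem.List.pyRange 0 (n : Int) 1,
      ((PySem.List.pyRange 0 (n : Int) 1).foldl
        (fun (st2 : List Int × Int) idz =>
          if PySem.List.pyGetD (PySem.List.pyGetD board idy []) idz 0 == 1 then
            (PySem.List.pySetD st2.1 idz (PySem.List.pyGetD st2.1 idz 0 + 1), st2.2 + 1)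
          else st2) (c, (0 : Int))).1
      = ((PySem.List.pyRange 0 (n : Int) 1).foldl
        (fun (st2 : List Int × Int) idz =>
          if PySem.List.pyGetD (PySem.List.pyGetD (board.take n) idy []) idz 0 == 1 then
            (PySem.List.pySetD st2.1 idz (PySem.List.pyGetD st2.1 idz 0 + 1), st2.2 + 1)
          else st2) (c, (0 : Int))).1 := by
    intro c idy hmem
    obtain ⟨hy0, hyn⟩ := PySem.List.mem_pyRange_one.1 hmem
    rw [htake idy hy0 hyn]
  rw [PySem.List.foldl_congr_mem _ _ _ _ hcongr2]
  have hconv := PySem.List.foldl_pyRange_zero_pyGetD (board.take n) ([] : List Int)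
    (fun c row => ((PySem.List.pyRange 0 (n : Int) 1).foldl
      (fun (st2 : List Int × Int) idz =>
        if PySem.List.pyGetD row idz 0 == 1 then
          (PySem.List.pySetD st2.1 idz (PySem.List.pyGetD st2.1 idz 0 + 1), st2.2 + 1)
        else st2) (c, (0 : Int))).1)
    ((PySem.List.pyRange 0 (n : Int) 1).map (fun _ => (0 : Int)))
  rw [show PySem.List.len (board.take n) = (n : Int) by rw [PySem.List.len_eq, htakelen]] at hconv
  rw [hconv]
  -- column phase is a pvMark fold over the column triggers
  have hinit_len : ((PySem.List.pyRange 0 (n : Int) 1).map (fun _ => (0 : Int))).length = n := by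
    simp [PySem.List.length_pyRange_one]
  have hcf := pvColFold n n (board.take n) hrows
    ((PySem.List.pyRange 0 (n : Int) 1).map (fun _ => (0 : Int))) hinit_len
  have hinit_getD : ∀ j : Nat,
      ((PySem.List.pyRange 0 (n : Int) 1).map (fun _ => (0 : Int))).getD j 0 = 0 := by
    intro j
    rw [List.getD_eq_getElem?_getD, List.getElem?_map]
    cases (PySem.List.pyRange 0 (n : Int) 1)[j]? <;> simp
  have hcol : ∀ (wb2 : List Int), ∀ idz ∈ PySem.List.pyRange 0 (n : Int) 1,
      (if PySem.List.pyGetD ((board.take n).foldl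
          (fun c row => ((PySem.List.pyRange 0 (n : Int) 1).foldl
            (fun (st2 : List Int × Int) idz =>
              if PySem.List.pyGetD row idz 0 == 1 then
                (PySem.List.pySetD st2.1 idz (PySem.List.pyGetD st2.1 idz 0 + 1), st2.2 + 1)
              else st2) (c, (0 : Int))).1)
          ((PySem.List.pyRange 0 (n : Int) 1).map (fun _ => (0 : Int)))) idz 0 == (n : Int)
        && PySem.List.pyGetD wb2 idx 0 == 0 then
        PySem.List.pySetD wb2 idx ((PySem.List.max? wb2 (fun x => x)).getD 0 + 1)
      else wb2)
      = pvMark idx (PySem.List.pyGetD ((board.take n).foldl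
          (fun c row => ((PySem.List.pyRange 0 (n : Int) 1).foldl
            (fun (st2 : List Int × Int) idz =>
              if PySem.List.pyGetD row idz 0 == 1 then
                (PySem.List.pySetD st2.1 idz (PySem.List.pyGetD st2.1 idz 0 + 1), st2.2 + 1)
              else st2) (c, (0 : Int))).1)
          ((PySem.List.pyRange 0 (n : Int) 1).map (fun _ => (0 : Int)))) idz 0 == (n : Int)) wb2 :=
    fun _ _ _ => rfl
  rw [PySem.List.foldl_congr_mem _ _ _ _ hcol]
  rw [pvMark_fold idx h0, pvMark_comb idx h0]
  -- identify the two win booleans with B's any/all checks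
  have hR : ((PySem.List.pyRange 0 (n : Int) 1).any (fun idy =>
      ((((PySem.List.pyGetD board idy []).take n).countP (fun c => c == 1) : Int) == (n : Int))))
      = (PySem.List.pyRange 0 (n : Int) 1).any (fun r =>
          (PySem.List.pyGetD board r []).all (fun cell => cell == 1)) := by
    apply PySem.List.any_congr_mem
    intro idy hmem
    obtain ⟨hy0, hyn⟩ := PySem.List.mem_pyRange_one.1 hmem
    have hl : (PySem.List.pyGetD board idy []).length = n := hlen _ (hmemtake idy hy0 hyn)
    rw [List.take_of_length_le hl.le]
    exact pvCountAll _ n hl _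
  have hC : ((PySem.List.pyRange 0 (n : Int) 1).any (fun idz =>
      PySem.List.pyGetD ((board.take n).foldl
          (fun c row => ((PySem.List.pyRange 0 (n : Int) 1).foldl
            (fun (st2 : List Int × Int) idz =>
              if PySem.List.pyGetD row idz 0 == 1 then
                (PySem.List.pySetD st2.1 idz (PySem.List.pyGetD st2.1 idz 0 + 1), st2.2 + 1)
              else st2) (c, (0 : Int))).1)
          ((PySem.List.pyRange 0 (n : Int) 1).map (fun _ => (0 : Int)))) idz 0 == (n : Int)))
      = (PySem.List.pyRange 0 (n : Int) 1).any (fun c =>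
          (PySem.List.pyRange 0 (n : Int) 1).all (fun r =>
            PySem.List.pyGetD (PySem.List.pyGetD board r []) c 0 == 1)) := by
    apply PySem.List.any_congr_mem
    intro idz hmem
    obtain ⟨hz0, hzn⟩ := PySem.List.mem_pyRange_one.1 hmem
    have hidz : idz = ((idz.toNat : Nat) : Int) := (Int.toNat_of_nonneg hz0).symm
    rw [hidz, PySem.List.pyGetD_natCast, hcf.2 idz.toNat, hinit_getD, zero_add]
    have hkw : idz.toNat < n := by omega
    rw [List.countP_congr (q := fun r => r.getD idz.toNat 0 == 1)
      (fun r _ => by simp [hkw])]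
    rw [pvCountAll (board.take n) n htakelen]
    have hmap := PySem.List.map_pyGetD_pyRange_zero (board.take n) ([] : List Int)
    rw [show PySem.List.len (board.take n) = (n : Int) by rw [PySem.List.len_eq, htakelen]] at hmap
    conv_lhs => rw [← hmap]
    rw [List.all_map]
    apply pvAllCongrMem
    intro idy hmy
    obtain ⟨hy0, hyn⟩ := PySem.List.mem_pyRange_one.1 hmy
    simp only [Function.comp]
    rw [← htake idy hy0 hyn, PySem.List.pyGetD_natCast]
  rw [hR, hC]

-- ===== VERDICT (by name: the statement is the Claim_ definition above) =====
theorem mark_finished_boards_spec : Claim_equal_mark_finished_boards := by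
  unfold Claim_equal_mark_finished_boards
  intro boards winner_boards board_size _ hpre
  unfold Spec_mark_finished_boards mark_finished_boards mark_finished_boards_alt
  rw [PySem.List.enumerate_eq_map_pyRange boards ([] : List (List Int)), List.foldl_map,
    PySem.List.len_eq]
  refine PySem.List.foldl_congr_mem _ _ _ _ ?_
  intro wbacc idx hmem
  obtain ⟨h0, hlt⟩ := PySem.List.mem_pyRange_one.1 hmem
  have hbne : boards ≠ [] := by
    intro h; subst h; simp at hlt; omega
  dsimp only
  by_cases hbs : 0 < board_size
  case neg =>
    -- board_size ≤ 0: every range is empty, neither side can mark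
    have hz : PySem.List.pyRange 0 board_size 1 = [] :=
      PySem.List.pyRange_one_eq_nil (by omega)
    simp only [hz, List.foldl_nil, List.any_nil, Bool.false_or, Bool.false_and,
      Bool.false_eq_true, if_false]
  case pos =>
    obtain ⟨hsq, _⟩ := hpre hbs hbne
    obtain ⟨n, hbsn⟩ : ∃ n : Nat, board_size = (n : Int) :=
      ⟨board_size.toNat, (Int.toNat_of_nonneg (by omega)).symm⟩
    subst hbsn
    have hn : 0 < n := by omega
    simp only [Int.toNat_natCast] at hsq
    -- the scan width len(boards[0][0]) equals n on the square domain
    have hb0mem : boards.getD 0 [] ∈ boards := by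
      cases boards with
      | nil => exact absurd rfl hbne
      | cons b bs => simp [List.getD]
    obtain ⟨hb0len, hb0rows⟩ := hsq _ hb0mem
    have hb0pos : 0 < (boards.getD 0 []).length := by omega
    have hrow0mem : (boards.getD 0 []).getD 0 [] ∈ (boards.getD 0 []).take n := by
      have htl : 0 < ((boards.getD 0 []).take n).length := by
        rw [List.length_take]; omega
      have : (boards.getD 0 []).getD 0 [] = ((boards.getD 0 []).take n)[0] := by
        rw [List.getD_eq_getElem?_getD, List.getElem?_eq_getElem hb0pos]
        simp [List.getElem_take]
      rw [this]
      exact List.getElem_mem htl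
    have hW : ((PySem.List.pyGetD (PySem.List.pyGetD boards 0 []) 0 []).length) = n := by
      rw [PySem.List.pyGetD_zero, PySem.List.pyGetD_zero]
      exact hb0rows _ hrow0mem
    rw [hW]
    have hmemb : PySem.List.pyGetD boards idx [] ∈ boards :=
      PySem.List.pyGetD_mem boards [] (by simp [PySem.Raise.InRange]; omega)
    obtain ⟨hblen, hlen⟩ := hsq _ hmemb
    exact pvStepA (PySem.List.pyGetD boards idx []) n idx h0 hblen hlen wbacc
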